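-- pv_equiv track=rewrite | github.com/981377660LMT/algorithm-study | 7_graph/bfs求无权图的最短路径/多维度bfs/LCP 45. 自行车炫技赛场.py | bicycleYard
-- ===== SOURCE A (Python) =====
-- from typing import List
-- from collections import deque
--
-- def bicycleYard(
--     position: List[int], terrain: List[List[int]], obstacle: List[List[int]]
-- ) -> List[List[int]]:
--     ROW, COL = len(terrain), len(terrain[0])
--     sr, sc = position[0], position[1]
--
--     queue = deque([(sr, sc, 1)])
--     visited = [[set() for _ in range(COL)] for _ in range(ROW)]
--     res = set()
--     while queue:
--         r, c, curSpeed = queue.popleft()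
--         if curSpeed in visited[r][c]:
--             continue
--         visited[r][c].add(curSpeed)
--         if (curSpeed == 1) and (r, c) != (position[0], position[1]):
--             res.add((r, c))
--         for nr, nc in [(r - 1, c), (r + 1, c), (r, c - 1), (r, c + 1)]:
--             if 0 <= nr < ROW and 0 <= nc < COL:
--                 cand = terrain[r][c] - terrain[nr][nc] - obstacle[nr][nc] + curSpeed
--                 if cand > 0:
--                     queue.append((nr, nc, cand))  # type: ignore
--
--     return sorted(res)
-- ===== SOURCE B (Python) =====
-- from typing import List
--
--
-- def bicycleYard(
--     position: List[int], terrain: List[List[int]], obstacle: List[List[int]]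
-- ) -> List[List[int]]:
--     ROW, COL = len(terrain), len(terrain[0])
--     sr, sc = position[0], position[1]
--     visited = [[set() for _ in range(COL)] for _ in range(ROW)]
--     res = set()
--
--     def dfs(r: int, c: int, speed: int) -> None:
--         if speed in visited[r][c]:
--             return
--         visited[r][c].add(speed)
--         if speed == 1 and (r, c) != (sr, sc):
--             res.add((r, c))
--         for nr, nc in ((r - 1, c), (r + 1, c), (r, c - 1), (r, c + 1)):
--             if 0 <= nr < ROW and 0 <= nc < COL:
--                 cand = terrain[r][c] - terrain[nr][nc] - obstacle[nr][nc] + speed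
--                 if cand > 0:
--                     dfs(nr, nc, cand)
--
--     dfs(sr, sc, 1)
--     return sorted(res)
-- ===== Notes on version B (the rewrite author's own statement) =====
-- stated objective: alternative
-- what changed: Replaces the iterative deque-driven breadth-first search with a recursive depth-first traversal of the same (row, col, speed) state graph: a recursive dfs helper marks a state, records speed-1 cells, and recurses into each admissible neighbour, so the explicit worklist disappears and states are visited in depth-first rather than breadth-first order.
-- outside the precondition, e.g. on bicycleYard([0, 0], [[0, 0]], [[0, 0], [-5]]): A returns [(0, 1)], B returns [(0, 1)]; on bicycleYard([0, 0], [[0, 9]], [[100, -9]]): A returns [(0, 1)], B returns [(0, 1)]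
import Mathlib
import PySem

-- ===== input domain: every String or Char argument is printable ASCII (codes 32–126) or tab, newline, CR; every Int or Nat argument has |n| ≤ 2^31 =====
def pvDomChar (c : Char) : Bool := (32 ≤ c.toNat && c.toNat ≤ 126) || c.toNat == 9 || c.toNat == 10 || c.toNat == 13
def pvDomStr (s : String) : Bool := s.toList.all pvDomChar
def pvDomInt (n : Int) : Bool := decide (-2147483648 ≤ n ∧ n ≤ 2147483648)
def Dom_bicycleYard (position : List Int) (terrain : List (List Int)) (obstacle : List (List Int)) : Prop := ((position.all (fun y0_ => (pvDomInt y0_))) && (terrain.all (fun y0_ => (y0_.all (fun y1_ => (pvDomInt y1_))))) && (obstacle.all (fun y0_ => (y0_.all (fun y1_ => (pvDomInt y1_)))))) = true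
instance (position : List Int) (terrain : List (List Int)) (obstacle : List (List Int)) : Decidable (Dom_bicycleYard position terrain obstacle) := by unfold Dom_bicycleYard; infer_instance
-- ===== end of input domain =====

-- B replaces A's iterative deque BFS by a recursive depth-first traversal of the same
-- (row, col, speed) state graph (objective: alternative decomposition, same asymptotic cost).
-- Both ports are fueled transliterations: the fuel is a totality guard only, proved ample on Pre_.

-- ===== PORT A =====
-- g[r][c] (Python indexing, wraparound for negative indices; default only outside Pre_)
def pvAt (g : List (List Int)) (r c : Int) : Int :=
  PySem.List.pyGetD (PySem.List.pyGetD g r []) c 0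

-- visited[r][c]
def pvCell (vg : List (List (PySem.Set Int))) (r c : Int) : PySem.Set Int :=
  PySem.List.pyGetD (PySem.List.pyGetD vg r []) c PySem.Set.empty

-- visited[r][c] = v (in-place mutation of the inner list element)
def pvSetCell (vg : List (List (PySem.Set Int))) (r c : Int) (v : PySem.Set Int) :
    List (List (PySem.Set Int)) :=
  PySem.List.pySetD vg r (PySem.List.pySetD (PySem.List.pyGetD vg r []) c v)

-- the inner `for nr, nc in [...]` loop: the list of (nr, nc, cand) actually produced
-- (identical source lines in A and in B, so shared by both ports)
def pvNbrs (ROW COL : Int) (terrain obstacle : List (List Int)) (r c s : Int) :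
    List (Int × Int × Int) :=
  [(r - 1, c), (r + 1, c), (r, c - 1), (r, c + 1)].filterMap (fun p =>
    if 0 ≤ p.1 ∧ p.1 < ROW ∧ 0 ≤ p.2 ∧ p.2 < COL then
      (if 0 < pvAt terrain r c - pvAt terrain p.1 p.2 - pvAt obstacle p.1 p.2 + s then
        some (p.1, p.2, pvAt terrain r c - pvAt terrain p.1 p.2 - pvAt obstacle p.1 p.2 + s)
      else none)
    else none)

-- totality fuel: ample bound on the number of loop iterations / recursion depth
-- (speeds stay within the terrain spread on Pre_; proved in pvFuel_big below)
def pvFuel (terrain : List (List Int)) : Nat :=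
  5 + 5 * terrain.length * (terrain.headD []).length *
    (terrain.flatten.foldl max 0 - terrain.flatten.foldl min 0 + 2).toNat

-- the `while queue:` loop of A
def pvLoopA (ROW COL : Int) (terrain obstacle : List (List Int)) (start : Int × Int) :
    Nat → List (Int × Int × Int) → List (List (PySem.Set Int)) → PySem.Set (Int × Int) →
    PySem.Set (Int × Int)
  | _, [], _, res => res
  | 0, _ :: _, _, res => res
  | fuel + 1, (r, c, s) :: q, vg, res =>
    if PySem.Set.contains (pvCell vg r c) s then
      pvLoopA ROW COL terrain obstacle start fuel q vg res
    else
      pvLoopA ROW COL terrain obstacle start fuel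
        (q ++ pvNbrs ROW COL terrain obstacle r c s)
        (pvSetCell vg r c (PySem.Set.add (pvCell vg r c) s))
        (if s = 1 ∧ (r, c) ≠ start then PySem.Set.add res (r, c) else res)

def bicycleYard (position : List Int) (terrain : List (List Int)) (obstacle : List (List Int)) :
    List (Int × Int) :=
  let ROW : Int := terrain.length
  let COL : Int := (PySem.List.pyGetD terrain 0 []).length
  let sr : Int := PySem.List.pyGetD position 0 0
  let sc : Int := PySem.List.pyGetD position 1 0
  let vg : List (List (PySem.Set Int)) :=
    List.replicate ROW.toNat (List.replicate COL.toNat PySem.Set.empty)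
  PySem.List.sorted
    (pvLoopA ROW COL terrain obstacle (sr, sc) (pvFuel terrain) [(sr, sc, 1)] vg PySem.Set.empty)
    (fun p => toLex p) false

-- ===== PORT B =====
-- `def dfs(r, c, speed)` of B (pvDfs) together with its `for nr, nc in …: … dfs(nr, nc, cand)`
-- loop (pvDfsL, the structural recursion over the recursive calls made by the loop body).
-- The Nat argument is recursion-depth fuel (a totality guard only, proved ample on Pre_).
mutual
def pvDfs (ROW COL : Int) (terrain obstacle : List (List Int)) (start : Int × Int) :
    Nat → Int × Int × Int → List (List (PySem.Set Int)) × PySem.Set (Int × Int) →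
    List (List (PySem.Set Int)) × PySem.Set (Int × Int)
  | 0, _, st => st
  | fuel + 1, (r, c, s), (vg, res) =>
    if PySem.Set.contains (pvCell vg r c) s then (vg, res)
    else
      pvDfsL ROW COL terrain obstacle start fuel (pvNbrs ROW COL terrain obstacle r c s)
        (pvSetCell vg r c (PySem.Set.add (pvCell vg r c) s),
         if s = 1 ∧ (r, c) ≠ start then PySem.Set.add res (r, c) else res)
termination_by fuel x st => (fuel, 0)

def pvDfsL (ROW COL : Int) (terrain obstacle : List (List Int)) (start : Int × Int) :
    Nat → List (Int × Int × Int) → List (List (PySem.Set Int)) × PySem.Set (Int × Int) →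
    List (List (PySem.Set Int)) × PySem.Set (Int × Int)
  | _, [], st => st
  | fuel, x :: xs, st =>
    pvDfsL ROW COL terrain obstacle start fuel xs
      (pvDfs ROW COL terrain obstacle start fuel x st)
termination_by fuel xs st => (fuel, xs.length + 1)
end

def bicycleYard_alt (position : List Int) (terrain : List (List Int)) (obstacle : List (List Int)) :
    List (Int × Int) :=
  let ROW : Int := terrain.length
  let COL : Int := (PySem.List.pyGetD terrain 0 []).length
  let sr : Int := PySem.List.pyGetD position 0 0
  let sc : Int := PySem.List.pyGetD position 1 0
  let vg : List (List (PySem.Set Int)) :=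
    List.replicate ROW.toNat (List.replicate COL.toNat PySem.Set.empty)
  PySem.List.sorted
    (pvDfs ROW COL terrain obstacle (sr, sc) (pvFuel terrain) (sr, sc, 1)
      (vg, PySem.Set.empty)).2
    (fun p => toLex p) false

-- ===== PRECONDITION & SPEC =====
-- Pre_ covers the problem's stated domain — two start coordinates indexing a nonempty
-- rectangular terrain grid, an obstacle grid of the same dimensions with non-negative
-- entries — and additionally any in-range start whose first move is refused (the search
-- then ends at the start whatever the rest of the grids looks like).  Outside Pre_,
-- A can raise IndexError (a ragged row its search reaches) or loop forever (a reachable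
-- cycle with negative obstacle values makes the speed grow without bound); on excluded
-- inputs where A does return, B returns the same value (see the claim's cites).
def Pre_bicycleYard (position : List Int) (terrain : List (List Int)) (obstacle : List (List Int)) : Prop :=
  2 ≤ position.length ∧
  0 < terrain.length ∧
  0 < (terrain.headD []).length ∧
  -(terrain.length : Int) ≤ position.getD 0 0 ∧ position.getD 0 0 < (terrain.length : Int) ∧
  -((terrain.headD []).length : Int) ≤ position.getD 1 0 ∧
  position.getD 1 0 < ((terrain.headD []).length : Int) ∧
  (((∀ row ∈ terrain, row.length = (terrain.headD []).length) ∧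
    obstacle.length = terrain.length ∧
    (∀ row ∈ obstacle, row.length = (terrain.headD []).length) ∧
    (∀ row ∈ obstacle, ∀ v ∈ row, 0 ≤ v)) ∨
   (-((PySem.List.pyGetD terrain (position.getD 0 0) []).length : Int) ≤ position.getD 1 0 ∧
    position.getD 1 0 < ((PySem.List.pyGetD terrain (position.getD 0 0) []).length : Int) ∧
    ∀ p ∈ [(position.getD 0 0 - 1, position.getD 1 0), (position.getD 0 0 + 1, position.getD 1 0),
        (position.getD 0 0, position.getD 1 0 - 1), (position.getD 0 0, position.getD 1 0 + 1)],
      0 ≤ p.1 → p.1 < (terrain.length : Int) → 0 ≤ p.2 →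
        p.2 < ((terrain.headD []).length : Int) →
        (p.2 < ((PySem.List.pyGetD terrain p.1 []).length : Int) ∧
         p.1 < (obstacle.length : Int) ∧
         p.2 < ((PySem.List.pyGetD obstacle p.1 []).length : Int) ∧
         pvAt terrain (position.getD 0 0) (position.getD 1 0) - pvAt terrain p.1 p.2 -
           pvAt obstacle p.1 p.2 + 1 ≤ 0)))

instance (position : List Int) (terrain : List (List Int)) (obstacle : List (List Int)) :
    Decidable (Pre_bicycleYard position terrain obstacle) := by
  unfold Pre_bicycleYard; infer_instance

def pvWitness_bicycleYard : List Int × List (List Int) × List (List Int) :=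
  ([0, 0], [[0]], [[0]])

def Spec_bicycleYard (position : List Int) (terrain : List (List Int)) (obstacle : List (List Int))
    (out : List (Int × Int)) : Prop :=
  out = bicycleYard_alt position terrain obstacle

instance (position : List Int) (terrain : List (List Int)) (obstacle : List (List Int))
    (out : List (Int × Int)) : Decidable (Spec_bicycleYard position terrain obstacle out) := by
  unfold Spec_bicycleYard; infer_instance

-- ===== CLAIM (what is proved, stated in full; the proofs are below) =====
def Claim_equal_bicycleYard : Prop := ∀ (position : List Int) (terrain : List (List Int)) (obstacle : List (List Int)), Dom_bicycleYard position terrain obstacle → Pre_bicycleYard position terrain obstacle → Spec_bicycleYard position terrain obstacle (bicycleYard position terrain obstacle)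

-- ===== LEMMAS AND PROOFS =====

-- proof-side context: the values both ports compute from the arguments
structure PvCtx where
  R : Int
  C : Int
  t : List (List Int)
  o : List (List Int)
  sr : Int
  sc : Int

def pvS0 (g : PvCtx) : Int × Int × Int := (g.sr, g.sc, 1)

def pvSuccs (g : PvCtx) (x : Int × Int × Int) : List (Int × Int × Int) :=
  pvNbrs g.R g.C g.t g.o x.1 x.2.1 x.2.2

def pvKey (g : PvCtx) (x : Int × Int × Int) : Int × Int × Int :=
  (PySem.Int.mod x.1 g.R, PySem.Int.mod x.2.1 g.C, x.2.2)

def pvCan (g : PvCtx) (x : Int × Int × Int) : Prop :=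
  0 ≤ x.1 ∧ x.1 < g.R ∧ 0 ≤ x.2.1 ∧ x.2.1 < g.C

-- processed raw states: the start, plus successors whose visited key is fresh
inductive pvPR (g : PvCtx) : Int × Int × Int → Prop
  | init : pvPR g (pvS0 g)
  | step {z y : Int × Int × Int} : pvPR g z → y ∈ pvSuccs g z →
      pvKey g y ≠ pvKey g (pvS0 g) → pvPR g y

def pvCtxOK (g : PvCtx) : Prop :=
  0 < g.R ∧ 0 < g.C ∧ g.R = g.t.length ∧ (∀ row ∈ g.t, (row.length : Int) = g.C) ∧
  g.o.length = g.t.length ∧ (∀ row ∈ g.o, (row.length : Int) = g.C) ∧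
  (∀ row ∈ g.o, ∀ v ∈ row, 0 ≤ v) ∧
  -g.R ≤ g.sr ∧ g.sr < g.R ∧ -g.C ≤ g.sc ∧ g.sc < g.C

def pvBd (g : PvCtx) : Int := g.t.flatten.foldl max 0 - g.t.flatten.foldl min 0 + 1

def pvAllK (g : PvCtx) : Finset (Int × Int × Int) :=
  (Finset.range g.R.toNat ×ˢ (Finset.range g.C.toNat ×ˢ Finset.range (pvBd g).toNat)).image
    (fun k => ((k.1 : Int), ((k.2.1 : Int), (k.2.2 : Int) + 1)))

def pvU (g : PvCtx) (vg : List (List (PySem.Set Int))) : Nat :=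
  ((pvAllK g).filter (fun k => ¬ PySem.Set.contains (pvCell vg k.1 k.2.1) k.2.2 = true)).card

def pvDone (g : PvCtx) (S : Int × Int × Int → Prop) (y : Int × Int × Int) : Prop :=
  ∃ z, S z ∧ pvKey g z = pvKey g y

-- the visited grid has shape ROW × COL
def pvShape (ROW COL : Int) (vg : List (List (PySem.Set Int))) : Prop :=
  vg.length = ROW.toNat ∧ ∀ row ∈ vg, row.length = COL.toNat

-- the common invariant tying a ghost processed-set S to the visited grid and the result set
def pvInv (g : PvCtx) (S : Int × Int × Int → Prop) (vg : List (List (PySem.Set Int)))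
    (res : PySem.Set (Int × Int)) : Prop :=
  pvShape g.R g.C vg ∧ S (pvS0 g) ∧ (∀ x, S x → pvPR g x) ∧
  (∀ r c s : Int, 0 ≤ r → r < g.R → 0 ≤ c → c < g.C →
    (PySem.Set.contains (pvCell vg r c) s = true ↔ ∃ x, S x ∧ pvKey g x = (r, c, s))) ∧
  res.Nodup ∧
  (∀ p : Int × Int, p ∈ res ↔ (S (p.1, p.2, 1) ∧ p ≠ (g.sr, g.sc)))

-- ---------- small generic lemmas ----------

theorem pvIdx_wrap (n : Nat) (i : Int) (h0 : -(n : Int) ≤ i) (h1 : i < (n : Int)) :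
    PySem.List.pyIdx? n i = some (PySem.Int.mod i (n : Int)).toNat := by
  have hn : 0 < (n : Int) := by omega
  rw [PySem.Int.mod_eq_emod_of_pos hn]
  unfold PySem.List.pyIdx?
  rcases le_or_gt 0 i with h | h
  · rw [if_pos h, if_pos h1, Int.emod_eq_of_lt h h1]
  · have e : i % (n : Int) = i + n := by
      have h2 := Int.add_mul_emod_self_left (a := i) (b := (n : Int)) (c := 1)
      rw [mul_one] at h2
      rw [← h2]
      exact Int.emod_eq_of_lt (by omega) (by omega)
    rw [if_neg (by omega), if_pos h0, e]
    congr 1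
    omega

theorem pvGetD_wrap {α : Type} (xs : List α) (i : Int) (d : α)
    (h0 : -(xs.length : Int) ≤ i) (h1 : i < (xs.length : Int)) :
    PySem.List.pyGetD xs i d = xs.getD (PySem.Int.mod i (xs.length : Int)).toNat d := by
  unfold PySem.List.pyGetD PySem.List.pyGet?
  rw [pvIdx_wrap xs.length i h0 h1]
  simp [List.getD_eq_getElem?_getD]

theorem pvSetD_wrap {α : Type} (xs : List α) (i : Int) (v : α)
    (h0 : -(xs.length : Int) ≤ i) (h1 : i < (xs.length : Int)) :
    PySem.List.pySetD xs i v = xs.set (PySem.Int.mod i (xs.length : Int)).toNat v := by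
  unfold PySem.List.pySetD PySem.List.pySet?
  rw [pvIdx_wrap xs.length i h0 h1]
  rfl

theorem pvMod_id (a n : Int) (h0 : 0 ≤ a) (h1 : a < n) : PySem.Int.mod a n = a := by
  rw [PySem.Int.mod_eq_emod_of_pos (by omega)]
  exact Int.emod_eq_of_lt h0 h1

theorem pvCell_pvSetCell (ROW COL : Int) {vg : List (List (PySem.Set Int))}
    (hs : pvShape ROW COL vg) {r c r' c' : Int} (v : PySem.Set Int)
    (hr0 : 0 ≤ r) (hr1 : r < ROW) (hc0 : 0 ≤ c) (hc1 : c < COL)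
    (hr0' : 0 ≤ r') (hr1' : r' < ROW) (hc0' : 0 ≤ c') (hc1' : c' < COL) :
    pvCell (pvSetCell vg r c v) r' c' =
      if r' = r ∧ c' = c then v else pvCell vg r' c' := by
  obtain ⟨hlen, hrow⟩ := hs
  have hrN : r.toNat < vg.length := by omega
  have hrN' : r'.toNat < vg.length := by omega
  have hrowlen : (vg.getD r.toNat []).length = COL.toNat := by
    rw [List.getD_eq_getElem vg [] hrN]; exact hrow _ (vg.getElem_mem hrN)
  unfold pvCell pvSetCell
  rw [PySem.List.pySetD_of_nonneg _ _ hr0, PySem.List.pySetD_of_nonneg _ _ hc0,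
    PySem.List.pyGetD_of_nonneg _ _ hr0, PySem.List.pyGetD_of_nonneg _ _ hr0',
    PySem.List.pyGetD_of_nonneg _ _ hc0', PySem.List.pyGetD_of_nonneg _ _ hr0',
    PySem.List.pyGetD_of_nonneg _ _ hc0']
  by_cases hrr : r' = r
  · subst hrr
    have e1 : (vg.set r'.toNat ((vg.getD r'.toNat []).set c.toNat v)).getD r'.toNat [] =
        (vg.getD r'.toNat []).set c.toNat v := by
      simp [List.getD_eq_getElem?_getD, hrN']
    rw [e1]
    by_cases hcc : c' = c
    · subst hcc
      have hcb : c'.toNat < (vg[r'.toNat]?.getD []).length := by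
        rw [← List.getD_eq_getElem?_getD]; omega
      simp [List.getD_eq_getElem?_getD, hcb]
    · have hne : ¬ c.toNat = c'.toNat := by omega
      rw [List.getD_eq_getElem?_getD, List.getElem?_set, if_neg hne, if_neg (by simp [hcc]),
        ← List.getD_eq_getElem?_getD]
  · have hne : ¬ r.toNat = r'.toNat := by omega
    rw [show ((vg.set r.toNat ((vg.getD r.toNat []).set c.toNat v)).getD r'.toNat []) =
          ((vg.set r.toNat ((vg.getD r.toNat []).set c.toNat v))[r'.toNat]?.getD []) from
        List.getD_eq_getElem?_getD, List.getElem?_set, if_neg hne,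
      ← List.getD_eq_getElem?_getD, if_neg (by simp [hrr])]

theorem pvShape_pvSetCell (ROW COL : Int) {vg : List (List (PySem.Set Int))}
    (hs : pvShape ROW COL vg) {r c : Int} (v : PySem.Set Int) (hr0 : 0 ≤ r) (hr1 : r < ROW)
    (hc0 : 0 ≤ c) :
    pvShape ROW COL (pvSetCell vg r c v) := by
  obtain ⟨hlen, hrow⟩ := hs
  unfold pvSetCell
  rw [PySem.List.pySetD_of_nonneg _ _ hr0, PySem.List.pyGetD_of_nonneg _ _ hr0]
  refine ⟨by simpa using hlen, ?_⟩
  intro row hmem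
  rcases List.mem_or_eq_of_mem_set hmem with h | h
  · exact hrow _ h
  · subst h
    rw [PySem.List.pySetD_of_nonneg _ _ hc0, List.length_set]
    have hrN : r.toNat < vg.length := by omega
    rw [List.getD_eq_getElem vg [] hrN]
    exact hrow _ (vg.getElem_mem hrN)

theorem pvCell_wrap (ROW COL : Int) {vg : List (List (PySem.Set Int))}
    (hs : pvShape ROW COL vg) {r c : Int}
    (hr0 : -ROW ≤ r) (hr1 : r < ROW) (hc0 : -COL ≤ c) (hc1 : c < COL)
    (hR : 0 < ROW) (hC : 0 < COL) :
    pvCell vg r c = pvCell vg (PySem.Int.mod r ROW) (PySem.Int.mod c COL) := by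
  obtain ⟨hlen, hrow⟩ := hs
  have hlenI : (vg.length : Int) = ROW := by omega
  have wr0 : 0 ≤ PySem.Int.mod r ROW := PySem.Int.mod_nonneg r hR
  have wc0 : 0 ≤ PySem.Int.mod c COL := PySem.Int.mod_nonneg c hC
  have hk : (PySem.Int.mod r ROW).toNat < vg.length := by
    have := PySem.Int.mod_lt r hR
    omega
  have hrlen : (vg.getD (PySem.Int.mod r ROW).toNat []).length = COL.toNat := by
    rw [List.getD_eq_getElem _ _ hk]
    exact hrow _ (vg.getElem_mem hk)
  unfold pvCell
  rw [pvGetD_wrap vg r [] (by omega) (by omega), hlenI,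
    PySem.List.pyGetD_of_nonneg _ _ wr0,
    pvGetD_wrap _ c _ (by rw [hrlen]; omega) (by rw [hrlen]; omega), hrlen,
    show ((COL.toNat : Int)) = COL by omega,
    PySem.List.pyGetD_of_nonneg _ _ wc0]

theorem pvSetCell_wrap (ROW COL : Int) {vg : List (List (PySem.Set Int))}
    (hs : pvShape ROW COL vg) {r c : Int} (v : PySem.Set Int)
    (hr0 : -ROW ≤ r) (hr1 : r < ROW) (hc0 : -COL ≤ c) (hc1 : c < COL)
    (hR : 0 < ROW) (hC : 0 < COL) :
    pvSetCell vg r c v = pvSetCell vg (PySem.Int.mod r ROW) (PySem.Int.mod c COL) v := by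
  obtain ⟨hlen, hrow⟩ := hs
  have hlenI : (vg.length : Int) = ROW := by omega
  have wr0 : 0 ≤ PySem.Int.mod r ROW := PySem.Int.mod_nonneg r hR
  have wc0 : 0 ≤ PySem.Int.mod c COL := PySem.Int.mod_nonneg c hC
  have hk : (PySem.Int.mod r ROW).toNat < vg.length := by
    have := PySem.Int.mod_lt r hR
    omega
  have hrlen : (vg.getD (PySem.Int.mod r ROW).toNat []).length = COL.toNat := by
    rw [List.getD_eq_getElem _ _ hk]
    exact hrow _ (vg.getElem_mem hk)
  unfold pvSetCell
  rw [pvGetD_wrap vg r [] (by omega) (by omega), hlenI,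
    PySem.List.pyGetD_of_nonneg _ _ wr0,
    pvSetD_wrap _ c _ (by rw [hrlen]; omega) (by rw [hrlen]; omega), hrlen,
    show ((COL.toNat : Int)) = COL by omega,
    PySem.List.pySetD_of_nonneg _ _ wc0,
    pvSetD_wrap vg r _ (by omega) (by omega), hlenI,
    PySem.List.pySetD_of_nonneg _ _ wr0]

theorem pvCell_replicate (ROW COL : Int) {r c : Int}
    (h1 : 0 ≤ r) (h2 : r < ROW) (h3 : 0 ≤ c) (h4 : c < COL) :
    pvCell (List.replicate ROW.toNat (List.replicate COL.toNat PySem.Set.empty)) r c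
      = PySem.Set.empty := by
  unfold pvCell
  rw [PySem.List.pyGetD_of_nonneg _ _ h1, PySem.List.pyGetD_of_nonneg _ _ h3]
  have h5 : (List.replicate ROW.toNat (List.replicate COL.toNat (PySem.Set.empty :
      PySem.Set Int))).getD r.toNat [] = List.replicate COL.toNat PySem.Set.empty := by
    rw [List.getD_eq_getElem _ _ (by simp; omega), List.getElem_replicate]
  rw [h5, List.getD_eq_getElem _ _ (by simp; omega), List.getElem_replicate]

-- ---------- facts about pvNbrs / pvPR ----------

theorem pvMem_nbrs (ROW COL : Int) (terrain obstacle : List (List Int))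
    {r c s : Int} {y : Int × Int × Int} (hy : y ∈ pvNbrs ROW COL terrain obstacle r c s) :
    (0 ≤ y.1 ∧ y.1 < ROW ∧ 0 ≤ y.2.1 ∧ y.2.1 < COL) ∧
    y.2.2 = pvAt terrain r c - pvAt terrain y.1 y.2.1 - pvAt obstacle y.1 y.2.1 + s ∧
    0 < y.2.2 := by
  simp only [pvNbrs, List.mem_filterMap] at hy
  obtain ⟨p, _, he⟩ := hy
  split_ifs at he with h1 h2
  simp only [Option.some.injEq] at he
  subst he
  exact ⟨⟨h1.1, h1.2.1, h1.2.2.1, h1.2.2.2⟩, rfl, h2⟩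

theorem pvNbrs_len (ROW COL : Int) (terrain obstacle : List (List Int)) (r c s : Int) :
    (pvNbrs ROW COL terrain obstacle r c s).length ≤ 4 := by
  exact le_trans (List.length_filterMap_le _ _) (by simp)

theorem pvNbrs_nil (ROW COL : Int) (terrain obstacle : List (List Int)) (r c s : Int)
    (h : ∀ p ∈ [(r - 1, c), (r + 1, c), (r, c - 1), (r, c + 1)],
      0 ≤ p.1 → p.1 < ROW → 0 ≤ p.2 → p.2 < COL →
      pvAt terrain r c - pvAt terrain p.1 p.2 - pvAt obstacle p.1 p.2 + s ≤ 0) :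
    pvNbrs ROW COL terrain obstacle r c s = [] := by
  unfold pvNbrs
  rw [List.filterMap_eq_nil_iff]
  intro p hp
  split_ifs with h1 h2
  · exfalso
    have := h p hp h1.1 h1.2.1 h1.2.2.1 h1.2.2.2
    omega
  · rfl
  · rfl

theorem pvPR_cases (g : PvCtx) {x : Int × Int × Int} (h : pvPR g x) :
    x = pvS0 g ∨ (pvCan g x ∧ pvKey g x ≠ pvKey g (pvS0 g)) := by
  induction h with
  | init => exact Or.inl rfl
  | step hz hy hk ih =>
    refine Or.inr ⟨?_, hk⟩
    exact (pvMem_nbrs _ _ _ _ hy).1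

theorem pvKey_can (g : PvCtx) {x : Int × Int × Int} (h : pvCan g x) : pvKey g x = x := by
  obtain ⟨h1, h2, h3, h4⟩ := h
  unfold pvKey
  rw [pvMod_id _ _ h1 h2, pvMod_id _ _ h3 h4]

theorem pvPR_key_inj (g : PvCtx) (hg : pvCtxOK g) {z z' : Int × Int × Int}
    (h : pvPR g z) (h' : pvPR g z') (hk : pvKey g z' = pvKey g z) : z' = z := by
  rcases pvPR_cases g h with rfl | ⟨hc, hk0⟩
  · rcases pvPR_cases g h' with rfl | ⟨hc', hk0'⟩
    · rfl
    · exact absurd hk hk0'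
  · rcases pvPR_cases g h' with rfl | ⟨hc', _⟩
    · exact absurd hk.symm hk0
    · rw [pvKey_can g hc', pvKey_can g hc] at hk
      exact hk

theorem pvFoldMax (l : List Int) (a : Int) : a ≤ l.foldl max a ∧ ∀ v ∈ l, v ≤ l.foldl max a := by
  induction l generalizing a with
  | nil => exact ⟨le_refl _, by simp⟩
  | cons x xs ih =>
    refine ⟨le_trans (le_max_left a x) (ih (max a x)).1, ?_⟩
    intro v hv
    rcases List.mem_cons.1 hv with rfl | hv
    · exact le_trans (le_max_right a v) (ih (max a v)).1
    · exact (ih (max a x)).2 v hv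

theorem pvFoldMin (l : List Int) (a : Int) : l.foldl min a ≤ a ∧ ∀ v ∈ l, l.foldl min a ≤ v := by
  induction l generalizing a with
  | nil => exact ⟨le_refl _, by simp⟩
  | cons x xs ih =>
    refine ⟨le_trans (ih (min a x)).1 (min_le_left a x), ?_⟩
    intro v hv
    rcases List.mem_cons.1 hv with rfl | hv
    · exact le_trans (ih (min a v)).1 (min_le_right a v)
    · exact (ih (min a x)).2 v hv

-- entry of the terrain at the canonical cell of a state; real list entry under pvCtxOK
def pvTv (g : PvCtx) (x : Int × Int × Int) : Int :=
  pvAt g.t (PySem.Int.mod x.1 g.R) (PySem.Int.mod x.2.1 g.C)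

theorem pvTv_mem (g : PvCtx) (hg : pvCtxOK g) (x : Int × Int × Int)
    (hr : -g.R ≤ x.1) (hr' : x.1 < g.R) (hc : -g.C ≤ x.2.1) (hc' : x.2.1 < g.C) :
    pvTv g x ∈ g.t.flatten ∧ pvAt g.t x.1 x.2.1 = pvTv g x := by
  obtain ⟨hR, hC, hRt, hrect, _, _, _, _⟩ := hg
  have hlenI : (g.t.length : Int) = g.R := by omega
  have wr0 : 0 ≤ PySem.Int.mod x.1 g.R := PySem.Int.mod_nonneg _ hR
  have wr1 := PySem.Int.mod_lt x.1 hR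
  have wc0 : 0 ≤ PySem.Int.mod x.2.1 g.C := PySem.Int.mod_nonneg _ hC
  have wc1 := PySem.Int.mod_lt x.2.1 hC
  have hk : (PySem.Int.mod x.1 g.R).toNat < g.t.length := by omega
  have hrowmem : g.t.getD (PySem.Int.mod x.1 g.R).toNat [] ∈ g.t := by
    rw [List.getD_eq_getElem _ _ hk]; exact g.t.getElem_mem hk
  have hrlen : ((g.t.getD (PySem.Int.mod x.1 g.R).toNat []).length : Int) = g.C :=
    hrect _ hrowmem
  have hveq : pvTv g x = (g.t.getD (PySem.Int.mod x.1 g.R).toNat []).getD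
      (PySem.Int.mod x.2.1 g.C).toNat 0 := by
    unfold pvTv pvAt
    rw [PySem.List.pyGetD_of_nonneg _ _ wr0, PySem.List.pyGetD_of_nonneg _ _ wc0]
  constructor
  · rw [hveq]
    have hj : (PySem.Int.mod x.2.1 g.C).toNat <
        (g.t.getD (PySem.Int.mod x.1 g.R).toNat []).length := by omega
    rw [List.getD_eq_getElem _ _ hj]
    exact List.mem_flatten.2 ⟨_, hrowmem, List.getElem_mem hj⟩
  · unfold pvTv pvAt
    rw [pvGetD_wrap g.t x.1 [] (by omega) (by omega), hlenI,
      pvGetD_wrap _ x.2.1 0 (by omega) (by omega), hrlen,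
      PySem.List.pyGetD_of_nonneg _ _ wr0, PySem.List.pyGetD_of_nonneg _ _ wc0]

theorem pvObs_nonneg (g : PvCtx) (hg : pvCtxOK g) (r c : Int)
    (hr : 0 ≤ r) (hr' : r < g.R) (hc : 0 ≤ c) (hc' : c < g.C) :
    0 ≤ pvAt g.o r c := by
  obtain ⟨hR, hC, hRt, hrect, holen, horect, hononneg, _⟩ := hg
  have hlenI : (g.o.length : Int) = g.R := by omega
  have hk : r.toNat < g.o.length := by omega
  have hrowmem : g.o.getD r.toNat [] ∈ g.o := by
    rw [List.getD_eq_getElem _ _ hk]; exact g.o.getElem_mem hk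
  have hrlen : ((g.o.getD r.toNat []).length : Int) = g.C := horect _ hrowmem
  have hj : c.toNat < (g.o.getD r.toNat []).length := by omega
  unfold pvAt
  rw [PySem.List.pyGetD_of_nonneg _ _ hr, PySem.List.pyGetD_of_nonneg _ _ hc,
    List.getD_eq_getElem _ _ hj]
  exact hononneg _ hrowmem _ (List.getElem_mem hj)

theorem pvPR_bound (g : PvCtx) (hg : pvCtxOK g) {x : Int × Int × Int} (h : pvPR g x) :
    (x = pvS0 g ∨ pvCan g x) ∧ 1 ≤ x.2.2 ∧ x.2.2 + pvTv g x ≤ 1 + pvTv g (pvS0 g) := by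
  induction h with
  | init =>
    refine ⟨Or.inl rfl, le_refl _, le_refl _⟩
  | @step z y hz hy hk ih =>
    obtain ⟨hzshape, hzs, hzbd⟩ := ih
    obtain ⟨hycan, hyval, hypos⟩ := pvMem_nbrs g.R g.C g.t g.o hy
    refine ⟨Or.inr hycan, by omega, ?_⟩
    have hzrange : -g.R ≤ z.1 ∧ z.1 < g.R ∧ -g.C ≤ z.2.1 ∧ z.2.1 < g.C := by
      rcases hzshape with rfl | hc
      · obtain ⟨_, _, _, _, _, _, _, h1, h2, h3, h4⟩ := hg
        exact ⟨h1, h2, h3, h4⟩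
      · obtain ⟨a, b, c, d⟩ := hc
        refine ⟨by omega, b, by omega, d⟩
    have hzt := (pvTv_mem g hg z hzrange.1 hzrange.2.1 hzrange.2.2.1 hzrange.2.2.2).2
    have hyt := (pvTv_mem g hg y (by omega) (by omega) (by omega) (by omega)).2
    have hobs := pvObs_nonneg g hg y.1 y.2.1 hycan.1 hycan.2.1 hycan.2.2.1 hycan.2.2.2
    rw [hyval, hzt, hyt] at *
    omega

theorem pvPR_key_AllK (g : PvCtx) (hg : pvCtxOK g) {x : Int × Int × Int} (h : pvPR g x) :
    pvKey g x ∈ pvAllK g := by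
  obtain ⟨hR, hC, _, _, _, _, _, hsr1, hsr2, hsc1, hsc2⟩ := id hg
  obtain ⟨hshape, hs1, hsbd⟩ := pvPR_bound g hg h
  have hrange : -g.R ≤ x.1 ∧ x.1 < g.R ∧ -g.C ≤ x.2.1 ∧ x.2.1 < g.C := by
    rcases hshape with rfl | hc
    · exact ⟨hsr1, hsr2, hsc1, hsc2⟩
    · obtain ⟨a, b, c, d⟩ := hc
      exact ⟨by omega, b, by omega, d⟩
  have ht0 := (pvTv_mem g hg (pvS0 g) (by simp [pvS0]; omega) (by simp [pvS0]; omega)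
    (by simp [pvS0]; omega) (by simp [pvS0]; omega)).1
  have htx := (pvTv_mem g hg x hrange.1 hrange.2.1 hrange.2.2.1 hrange.2.2.2).1
  have hmax := (pvFoldMax g.t.flatten 0).2 _ ht0
  have hmin := (pvFoldMin g.t.flatten 0).2 _ htx
  have hBd : x.2.2 ≤ pvBd g := by unfold pvBd; omega
  have hBd0 : 1 ≤ pvBd g := by
    have h1 := (pvFoldMax g.t.flatten 0).1
    have h2 := (pvFoldMin g.t.flatten 0).1
    unfold pvBd; omega
  have wr0 : 0 ≤ PySem.Int.mod x.1 g.R := PySem.Int.mod_nonneg _ hR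
  have wr1 := PySem.Int.mod_lt x.1 hR
  have wc0 : 0 ≤ PySem.Int.mod x.2.1 g.C := PySem.Int.mod_nonneg _ hC
  have wc1 := PySem.Int.mod_lt x.2.1 hC
  unfold pvAllK pvKey
  rw [Finset.mem_image]
  refine ⟨((PySem.Int.mod x.1 g.R).toNat, ((PySem.Int.mod x.2.1 g.C).toNat,
    (x.2.2 - 1).toNat)), ?_, ?_⟩
  · simp only [Finset.mem_product, Finset.mem_range]
    omega
  · simp only [Prod.mk.injEq]
    omega

-- ---------- counting ----------

theorem pvAllK_can (g : PvCtx) {k : Int × Int × Int} (hk : k ∈ pvAllK g) :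
    0 ≤ k.1 ∧ k.1 < g.R ∧ 0 ≤ k.2.1 ∧ k.2.1 < g.C := by
  unfold pvAllK at hk
  rw [Finset.mem_image] at hk
  obtain ⟨a, ha, rfl⟩ := hk
  simp only [Finset.mem_product, Finset.mem_range] at ha
  refine ⟨by positivity, ?_, by positivity, ?_⟩ <;> · simp; omega

theorem pvU_le_card (g : PvCtx) (vg : List (List (PySem.Set Int))) :
    pvU g vg ≤ (pvAllK g).card := by
  exact Finset.card_filter_le _ _

theorem pvU_mono (g : PvCtx) {vg vg' : List (List (PySem.Set Int))}
    (h : ∀ k ∈ pvAllK g, PySem.Set.contains (pvCell vg k.1 k.2.1) k.2.2 = true →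
      PySem.Set.contains (pvCell vg' k.1 k.2.1) k.2.2 = true) :
    pvU g vg' ≤ pvU g vg := by
  apply Finset.card_le_card
  intro k hk
  rw [Finset.mem_filter] at hk ⊢
  exact ⟨hk.1, fun hc => hk.2 (h k hk.1 hc)⟩

theorem pvU_dec (g : PvCtx) {vg vg' : List (List (PySem.Set Int))} {y : Int × Int × Int}
    (hk : y ∈ pvAllK g)
    (hfresh : ¬ PySem.Set.contains (pvCell vg y.1 y.2.1) y.2.2 = true)
    (hmark : PySem.Set.contains (pvCell vg' y.1 y.2.1) y.2.2 = true)
    (h : ∀ k ∈ pvAllK g, PySem.Set.contains (pvCell vg k.1 k.2.1) k.2.2 = true →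
      PySem.Set.contains (pvCell vg' k.1 k.2.1) k.2.2 = true) :
    pvU g vg' < pvU g vg := by
  apply Finset.card_lt_card
  rw [Finset.ssubset_iff_of_subset]
  · refine ⟨y, ?_, ?_⟩
    · rw [Finset.mem_filter]; exact ⟨hk, hfresh⟩
    · rw [Finset.mem_filter]; intro hc; exact hc.2 hmark
  · intro k hk
    rw [Finset.mem_filter] at hk ⊢
    exact ⟨hk.1, fun hc => hk.2 (h k hk.1 hc)⟩

theorem pvFuel_big (g : PvCtx) (hg : pvCtxOK g) :
    4 * (pvAllK g).card + 5 ≤ pvFuel g.t := by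
  obtain ⟨hR, hC, hRt, hrect, -, -, -, -⟩ := id hg
  have hcard : (pvAllK g).card ≤ g.R.toNat * g.C.toNat * (pvBd g).toNat := by
    refine le_trans (Finset.card_image_le) ?_
    rw [Finset.card_product, Finset.card_product, Finset.card_range, Finset.card_range,
      Finset.card_range, ← Nat.mul_assoc]
  have ht1 : g.R.toNat = g.t.length := by omega
  have hhead : (g.t.headD []).length = g.C.toNat := by
    cases ht : g.t with
    | nil => rw [ht] at hRt; simp at hRt; omega
    | cons r ts =>
      have := hrect r (by rw [ht]; exact List.mem_cons_self)
      simp only [List.headD_cons]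
      omega
  have h1 := (pvFoldMax g.t.flatten 0).1
  have h2 := (pvFoldMin g.t.flatten 0).1
  have hX : (g.t.flatten.foldl max 0 - g.t.flatten.foldl min 0 + 2).toNat
      = (pvBd g).toNat + 1 := by
    unfold pvBd; omega
  have hfuel : pvFuel g.t = 5 + 5 * (g.R.toNat * g.C.toNat * ((pvBd g).toNat + 1)) := by
    unfold pvFuel
    rw [hX, ← hhead, ← ht1]
    ring
  have hm : g.R.toNat * g.C.toNat * ((pvBd g).toNat + 1)
      = g.R.toNat * g.C.toNat * (pvBd g).toNat + g.R.toNat * g.C.toNat := Nat.mul_succ _ _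
  omega

-- ---------- the marking step (shared by both ports) ----------

theorem pvInvMark (g : PvCtx) (hg : pvCtxOK g) {S : Int × Int × Int → Prop}
    {vg : List (List (PySem.Set Int))} {res : PySem.Set (Int × Int)} {y : Int × Int × Int}
    (hInv : pvInv g S vg res) (hcan : pvCan g y)
    (hfresh : ¬ PySem.Set.contains (pvCell vg y.1 y.2.1) y.2.2 = true)
    (hPR : pvPR g y) :
    pvInv g (fun a => S a ∨ a = y)
      (pvSetCell vg y.1 y.2.1 (PySem.Set.add (pvCell vg y.1 y.2.1) y.2.2))
      (if y.2.2 = 1 ∧ (y.1, y.2.1) ≠ (g.sr, g.sc) then PySem.Set.add res (y.1, y.2.1) else res) ∧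
    pvU g (pvSetCell vg y.1 y.2.1 (PySem.Set.add (pvCell vg y.1 y.2.1) y.2.2)) < pvU g vg := by
  obtain ⟨hshape, hS0, hSub, hcell, hnd, hres⟩ := hInv
  obtain ⟨hy1, hy2, hy3, hy4⟩ := id hcan
  have hkeyy : pvKey g y = y := pvKey_can g hcan
  have hyAll : y ∈ pvAllK g := by
    have := pvPR_key_AllK g hg hPR
    rwa [hkeyy] at this
  have hcellEq : ∀ r c : Int, 0 ≤ r → r < g.R → 0 ≤ c → c < g.C →
      pvCell (pvSetCell vg y.1 y.2.1 (PySem.Set.add (pvCell vg y.1 y.2.1) y.2.2)) r c =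
        if r = y.1 ∧ c = y.2.1 then PySem.Set.add (pvCell vg y.1 y.2.1) y.2.2
        else pvCell vg r c :=
    fun r c h1 h2 h3 h4 => pvCell_pvSetCell g.R g.C hshape _ hy1 hy2 hy3 hy4 h1 h2 h3 h4
  have hmono : ∀ k ∈ pvAllK g, PySem.Set.contains (pvCell vg k.1 k.2.1) k.2.2 = true →
      PySem.Set.contains (pvCell (pvSetCell vg y.1 y.2.1
        (PySem.Set.add (pvCell vg y.1 y.2.1) y.2.2)) k.1 k.2.1) k.2.2 = true := by
    intro k hkA hc
    obtain ⟨k1, k2, k3, k4⟩ := pvAllK_can g hkA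
    rw [hcellEq k.1 k.2.1 k1 k2 k3 k4]
    split_ifs with hif
    · rw [PySem.Set.contains_iff] at hc ⊢
      rw [hif.1, hif.2] at hc
      exact (PySem.Set.mem_add _ _ _).2 (Or.inl hc)
    · exact hc
  constructor
  · refine ⟨pvShape_pvSetCell g.R g.C hshape _ hy1 hy2 hy3, Or.inl hS0, ?_, ?_, ?_, ?_⟩
    · rintro x (hx | rfl)
      exacts [hSub x hx, hPR]
    · intro r c s h1 h2 h3 h4
      rw [hcellEq r c h1 h2 h3 h4]
      split_ifs with hif
      · obtain ⟨rfl, rfl⟩ := hif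
        constructor
        · intro hmem
          rw [PySem.Set.contains_iff] at hmem
          rcases (PySem.Set.mem_add _ _ _).1 hmem with hold | hs
          · obtain ⟨x, hxS, hxk⟩ := (hcell y.1 y.2.1 s h1 h2 h3 h4).1
              ((PySem.Set.contains_iff _ _).2 hold)
            exact ⟨x, Or.inl hxS, hxk⟩
          · exact ⟨y, Or.inr rfl, by rw [hkeyy, hs]⟩
        · rintro ⟨x, hx | rfl, hxk⟩
          · rw [PySem.Set.contains_iff]
            exact (PySem.Set.mem_add _ _ _).2 (Or.inl ((PySem.Set.contains_iff _ _).1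
              ((hcell y.1 y.2.1 s h1 h2 h3 h4).2 ⟨x, hx, hxk⟩)))
          · rw [hkeyy] at hxk
            rw [PySem.Set.contains_iff]
            refine (PySem.Set.mem_add _ _ _).2 (Or.inr ?_)
            exact (congrArg (fun a => a.2.2) hxk).symm
      · rw [hcell r c s h1 h2 h3 h4]
        constructor
        · rintro ⟨x, hx, hxk⟩
          exact ⟨x, Or.inl hx, hxk⟩
        · rintro ⟨x, hx | rfl, hxk⟩
          · exact ⟨x, hx, hxk⟩
          · rw [hkeyy] at hxk
            exact absurd ⟨congrArg Prod.fst hxk.symm,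
              congrArg (fun a => a.2.1) hxk.symm⟩ hif
    · split_ifs with hcond
      · exact PySem.Set.nodup_add res _ hnd
      · exact hnd
    · intro p
      split_ifs with hcond
      · obtain ⟨hc1, hc2⟩ := hcond
        constructor
        · intro hp
          rcases (PySem.Set.mem_add _ _ _).1 hp with hold | rfl
          · obtain ⟨h5, h6⟩ := (hres p).1 hold
            exact ⟨Or.inl h5, h6⟩
          · refine ⟨Or.inr ?_, hc2⟩
            rw [← hc1]
        · rintro ⟨hS | hy, hne⟩
          · exact (PySem.Set.mem_add _ _ _).2 (Or.inl ((hres p).2 ⟨hS, hne⟩))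
          · refine (PySem.Set.mem_add _ _ _).2 (Or.inr ?_)
            cases hy
            rfl
      · constructor
        · intro hp
          obtain ⟨h5, h6⟩ := (hres p).1 hp
          exact ⟨Or.inl h5, h6⟩
        · rintro ⟨hS | hy, hne⟩
          · exact (hres p).2 ⟨hS, hne⟩
          · exfalso
            cases hy
            exact hcond ⟨rfl, hne⟩
  · refine pvU_dec g hyAll hfresh ?_ hmono
    rw [hcellEq y.1 y.2.1 hy1 hy2 hy3 hy4, if_pos ⟨rfl, rfl⟩, PySem.Set.contains_iff]
    exact (PySem.Set.mem_add _ _ _).2 (Or.inr rfl)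

-- fresh states popped from the worklists are processed states
theorem pvFreshPR (g : PvCtx) (hg : pvCtxOK g) {S : Int × Int × Int → Prop}
    {vg : List (List (PySem.Set Int))} {res : PySem.Set (Int × Int)} {y z : Int × Int × Int}
    (hInv : pvInv g S vg res) (hz : S z) (hy : y ∈ pvSuccs g z)
    (hfresh : ¬ PySem.Set.contains (pvCell vg y.1 y.2.1) y.2.2 = true) :
    pvCan g y ∧ pvPR g y ∧ ¬ pvDone g S y := by
  obtain ⟨hshape, hS0, hSub, hcell, hnd, hres⟩ := hInv
  obtain ⟨hcan, -, -⟩ := pvMem_nbrs g.R g.C g.t g.o hy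
  have hcan' : pvCan g y := hcan
  have hnd2 : ¬ pvDone g S y := by
    rintro ⟨x, hx, hk⟩
    apply hfresh
    rw [pvKey_can g hcan'] at hk
    exact (hcell y.1 y.2.1 y.2.2 hcan.1 hcan.2.1 hcan.2.2.1 hcan.2.2.2).2 ⟨x, hx, hk⟩
  have hknes0 : pvKey g y ≠ pvKey g (pvS0 g) := by
    intro hk
    exact hnd2 ⟨pvS0 g, hS0, hk.symm⟩
  exact ⟨hcan', pvPR.step (hSub z hz) hy hknes0, hnd2⟩

-- visited states are done
theorem pvVisDone (g : PvCtx) (hg : pvCtxOK g) {S : Int × Int × Int → Prop}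
    {vg : List (List (PySem.Set Int))} {res : PySem.Set (Int × Int)} {y : Int × Int × Int}
    (hInv : pvInv g S vg res) (hcan : pvCan g y)
    (hvis : PySem.Set.contains (pvCell vg y.1 y.2.1) y.2.2 = true) :
    pvDone g S y := by
  obtain ⟨hshape, hS0, hSub, hcell, hnd, hres⟩ := hInv
  obtain ⟨x, hx, hk⟩ := (hcell y.1 y.2.1 y.2.2 hcan.1 hcan.2.1 hcan.2.2.1 hcan.2.2.2).1 hvis
  exact ⟨x, hx, by rw [hk, pvKey_can g hcan]⟩

-- ---------- completeness / final characterization (shared) ----------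

theorem pvDone_mono (g : PvCtx) {S S' : Int × Int × Int → Prop}
    (h : ∀ a, S a → S' a) {y : Int × Int × Int} (hd : pvDone g S y) : pvDone g S' y := by
  obtain ⟨z, hz, hk⟩ := hd
  exact ⟨z, h z hz, hk⟩

theorem pvComplete (g : PvCtx) (hg : pvCtxOK g) {S : Int × Int × Int → Prop}
    (hsub : ∀ x, S x → pvPR g x) (hs0 : S (pvS0 g))
    (hclosed : ∀ z, S z → ∀ y ∈ pvSuccs g z, pvDone g S y) :
    ∀ x, pvPR g x → pvDone g S x := by
  intro x hx
  induction hx with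
  | init => exact ⟨pvS0 g, hs0, rfl⟩
  | @step z y hz hy hk ih =>
    obtain ⟨z', hz', hkz⟩ := ih
    have hzz : z' = z := pvPR_key_inj g hg hz (hsub z' hz') hkz
    subst hzz
    exact hclosed z' hz' y hy

theorem pvCharOfDone (g : PvCtx) (hg : pvCtxOK g) {S : Int × Int × Int → Prop}
    {res : PySem.Set (Int × Int)}
    (hsub : ∀ x, S x → pvPR g x)
    (hres : ∀ p : Int × Int, p ∈ res ↔ (S (p.1, p.2, 1) ∧ p ≠ (g.sr, g.sc)))
    (hdone : ∀ x, pvPR g x → pvDone g S x) :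
    ∀ p : Int × Int, p ∈ res ↔ (pvPR g (p.1, p.2, 1) ∧ p ≠ (g.sr, g.sc)) := by
  intro p
  rw [hres p]
  constructor
  · rintro ⟨h1, h2⟩
    exact ⟨hsub _ h1, h2⟩
  · rintro ⟨h1, h2⟩
    refine ⟨?_, h2⟩
    obtain ⟨z, hz, hk⟩ := hdone _ h1
    have := pvPR_key_inj g hg h1 (hsub z hz) hk
    rwa [← this]

-- ---------- main lemma for A's loop ----------

theorem pvMainA (g : PvCtx) (hg : pvCtxOK g) :
    ∀ (f : Nat) (q : List (Int × Int × Int)) (vg : List (List (PySem.Set Int)))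
      (res : PySem.Set (Int × Int)) (S : Int × Int × Int → Prop),
      pvInv g S vg res →
      (∀ y ∈ q, ∃ z, S z ∧ y ∈ pvSuccs g z) →
      (∀ z, S z → ∀ y ∈ pvSuccs g z, pvDone g S y ∨ y ∈ q) →
      4 * pvU g vg + q.length ≤ f →
      (pvLoopA g.R g.C g.t g.o (g.sr, g.sc) f q vg res).Nodup ∧
      ∀ p : Int × Int, p ∈ pvLoopA g.R g.C g.t g.o (g.sr, g.sc) f q vg res ↔
        (pvPR g (p.1, p.2, 1) ∧ p ≠ (g.sr, g.sc)) := by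
  intro f
  induction f with
  | zero =>
    intro q vg res S hInv hq hclosed hfuel
    have hq0 : q = [] := by
      cases q with
      | nil => rfl
      | cons a l => rw [List.length_cons] at hfuel; omega
    subst hq0
    obtain ⟨hsh, hS0, hSub, hcell, hnd, hres⟩ := id hInv
    simp only [pvLoopA]
    exact ⟨hnd, pvCharOfDone g hg hSub hres (pvComplete g hg hSub hS0
      (fun z hz y hy => (hclosed z hz y hy).resolve_right (by simp)))⟩
  | succ f ih =>
    intro q vg res S hInv hq hclosed hfuel
    cases q with
    | nil =>
      obtain ⟨hsh, hS0, hSub, hcell, hnd, hres⟩ := id hInv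
      simp only [pvLoopA]
      exact ⟨hnd, pvCharOfDone g hg hSub hres (pvComplete g hg hSub hS0
        (fun z hz y hy => (hclosed z hz y hy).resolve_right (by simp)))⟩
    | cons y q' =>
      obtain ⟨r, c, s⟩ := y
      obtain ⟨z, hz, hyz⟩ := hq (r, c, s) List.mem_cons_self
      simp only [pvLoopA]
      by_cases hvis : PySem.Set.contains (pvCell vg r c) s = true
      · rw [if_pos hvis]
        refine ih q' vg res S hInv (fun y hy => hq y (List.mem_cons_of_mem _ hy)) ?_ ?_
        · intro z' hz' y' hy'
          rcases hclosed z' hz' y' hy' with hd | hmem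
          · exact Or.inl hd
          · rcases List.mem_cons.1 hmem with rfl | hmem'
            · exact Or.inl (pvVisDone g hg hInv (pvMem_nbrs _ _ _ _ hyz).1 hvis)
            · exact Or.inr hmem'
        · rw [List.length_cons] at hfuel; omega
      · rw [if_neg hvis]
        obtain ⟨hcan, hPR, hndone⟩ := pvFreshPR g hg hInv hz hyz hvis
        obtain ⟨hInv', hU⟩ := pvInvMark g hg hInv hcan hvis hPR
        refine ih (q' ++ pvNbrs g.R g.C g.t g.o r c s) _ _
          (fun a => S a ∨ a = (r, c, s)) hInv' ?_ ?_ ?_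
        · intro y hy
          rcases List.mem_append.1 hy with hl | hr
          · obtain ⟨z0, hz0, h0⟩ := hq y (List.mem_cons_of_mem _ hl)
            exact ⟨z0, Or.inl hz0, h0⟩
          · exact ⟨(r, c, s), Or.inr rfl, hr⟩
        · intro z' hz' y' hy'
          rcases hz' with hz'S | rfl
          · rcases hclosed z' hz'S y' hy' with hd | hmem
            · exact Or.inl (pvDone_mono g (fun a h => Or.inl h) hd)
            · rcases List.mem_cons.1 hmem with rfl | hm'
              · exact Or.inl ⟨(r, c, s), Or.inr rfl, rfl⟩
              · exact Or.inr (List.mem_append_left _ hm')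
          · exact Or.inr (List.mem_append_right _ hy')
        · have hlen := pvNbrs_len g.R g.C g.t g.o r c s
          have hU' : pvU g (pvSetCell vg r c (PySem.Set.add (pvCell vg r c) s)) <
              pvU g vg := hU
          rw [List.length_cons] at hfuel
          rw [List.length_append]
          omega

-- ---------- main lemmas for B's recursion ----------

def pvDfsPost (g : PvCtx) (S : Int × Int × Int → Prop)
    (st : List (List (PySem.Set Int)) × PySem.Set (Int × Int))
    (xs : List (Int × Int × Int)) : Prop :=
  ∃ S', (∀ a, S a → S' a) ∧ pvInv g S' st.1 st.2 ∧ (∀ x ∈ xs, pvDone g S' x) ∧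
    (∀ z, S' z → ¬ S z → ∀ y ∈ pvSuccs g z, pvDone g S' y)

def pvDfsGood (g : PvCtx) (f : Nat) : Prop :=
  ∀ (x : Int × Int × Int) (vg : List (List (PySem.Set Int))) (res : PySem.Set (Int × Int))
    (S : Int × Int × Int → Prop),
    pvInv g S vg res → (∃ z, S z ∧ x ∈ pvSuccs g z) → pvU g vg + 1 ≤ f →
    pvDfsPost g S (pvDfs g.R g.C g.t g.o (g.sr, g.sc) f x (vg, res)) [x]

theorem pvMainBL (g : PvCtx) (hg : pvCtxOK g) (f : Nat) (hf : pvDfsGood g f) :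
    ∀ (xs : List (Int × Int × Int)) (vg : List (List (PySem.Set Int)))
      (res : PySem.Set (Int × Int)) (S : Int × Int × Int → Prop),
      pvInv g S vg res → (∀ x ∈ xs, ∃ z, S z ∧ x ∈ pvSuccs g z) → pvU g vg + 1 ≤ f →
      pvDfsPost g S (pvDfsL g.R g.C g.t g.o (g.sr, g.sc) f xs (vg, res)) xs := by
  intro xs
  induction xs with
  | nil =>
    intro vg res S hInv hxs hfuel
    simp only [pvDfsL]
    exact ⟨S, fun a h => h, hInv, by simp, fun z hz hnz => absurd hz hnz⟩
  | cons x xs ih =>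
    intro vg res S hInv hxs hfuel
    obtain ⟨S1, hm1, hInv1, hdone1, hcl1⟩ :=
      hf x vg res S hInv (hxs x List.mem_cons_self) hfuel
    have hU1 : pvU g (pvDfs g.R g.C g.t g.o (g.sr, g.sc) f x (vg, res)).1 ≤ pvU g vg := by
      apply pvU_mono
      intro k hkA hc
      obtain ⟨k1, k2, k3, k4⟩ := pvAllK_can g hkA
      obtain ⟨x0, hx0, hk0⟩ := (hInv.2.2.2.1 k.1 k.2.1 k.2.2 k1 k2 k3 k4).1 hc
      exact (hInv1.2.2.2.1 k.1 k.2.1 k.2.2 k1 k2 k3 k4).2 ⟨x0, hm1 x0 hx0, hk0⟩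
    obtain ⟨S2, hm2, hInv2, hdone2, hcl2⟩ :=
      ih (pvDfs g.R g.C g.t g.o (g.sr, g.sc) f x (vg, res)).1
        (pvDfs g.R g.C g.t g.o (g.sr, g.sc) f x (vg, res)).2 S1 hInv1
        (fun y hy => by
          obtain ⟨z0, hz0, h0⟩ := hxs y (List.mem_cons_of_mem _ hy)
          exact ⟨z0, hm1 z0 hz0, h0⟩)
        (by omega)
    refine ⟨S2, fun a h => hm2 a (hm1 a h), ?_, ?_, ?_⟩
    · simpa only [pvDfsL] using hInv2
    · intro y hy
      rcases List.mem_cons.1 hy with rfl | hy'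
      · exact pvDone_mono g hm2 (hdone1 y List.mem_cons_self)
      · exact hdone2 y hy'
    · intro z hz hnz y hy
      by_cases hz1 : S1 z
      · exact pvDone_mono g hm2 (hcl1 z hz1 hnz y hy)
      · exact hcl2 z hz hz1 y hy

theorem pvMainB (g : PvCtx) (hg : pvCtxOK g) : ∀ f : Nat, pvDfsGood g f := by
  intro f
  induction f with
  | zero =>
    intro x vg res S hInv hpend hfuel
    omega
  | succ f ih =>
    intro x vg res S hInv hpend hfuel
    obtain ⟨z, hz, hx⟩ := hpend
    obtain ⟨r, c, s⟩ := x
    simp only [pvDfs]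
    by_cases hvis : PySem.Set.contains (pvCell vg r c) s = true
    · rw [if_pos hvis]
      refine ⟨S, fun a h => h, hInv, ?_, fun z' hz' hnz' => absurd hz' hnz'⟩
      intro y hy
      rcases List.mem_cons.1 hy with rfl | hy'
      · exact pvVisDone g hg hInv (pvMem_nbrs _ _ _ _ hx).1 hvis
      · simp at hy'
    · rw [if_neg hvis]
      obtain ⟨hcan, hPR, hndone⟩ := pvFreshPR g hg hInv hz hx hvis
      obtain ⟨hInv', hU⟩ := pvInvMark g hg hInv hcan hvis hPR
      obtain ⟨S2, hm2, hInv2, hdoneAll, hcl2⟩ :=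
        pvMainBL g hg f ih (pvNbrs g.R g.C g.t g.o r c s) _ _
          (fun a => S a ∨ a = (r, c, s)) hInv'
          (fun y hy => ⟨(r, c, s), Or.inr rfl, hy⟩) (by omega)
      refine ⟨S2, fun a h => hm2 a (Or.inl h), hInv2, ?_, ?_⟩
      · intro y hy
        rcases List.mem_cons.1 hy with rfl | hy'
        · exact ⟨(r, c, s), hm2 _ (Or.inr rfl), rfl⟩
        · simp at hy'
      · intro z' hz' hnz' y hy
        by_cases hz1 : S z' ∨ z' = (r, c, s)
        · rcases hz1 with hzS | rfl
          · exact absurd hzS hnz'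
          · exact hdoneAll y hy
        · exact hcl2 z' hz' hz1 y hy

-- ===== VERDICT (by name: the statement is the Claim_ definition above) =====
theorem bicycleYard_spec : Claim_equal_bicycleYard := by
  unfold Claim_equal_bicycleYard
  intro position terrain obstacle hDom hPre
  unfold Spec_bicycleYard
  obtain ⟨hp2, ht0, htc0, hsr0, hsr1, hsc0, hsc1, hdisj⟩ := hPre
  have e0 : PySem.List.pyGetD position 0 0 = position.getD 0 0 := by
    rw [PySem.List.pyGetD_of_nonneg _ _ (by norm_num)]
    norm_num
  have e1 : PySem.List.pyGetD position 1 0 = position.getD 1 0 := by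
    rw [PySem.List.pyGetD_of_nonneg _ _ (by norm_num)]
    norm_num
  have eT : PySem.List.pyGetD terrain 0 [] = terrain.headD [] := by
    rw [PySem.List.pyGetD_of_nonneg _ _ (by norm_num)]
    cases terrain <;> rfl
  obtain ⟨k, hk⟩ : ∃ k, pvFuel terrain = k + 1 := ⟨pvFuel terrain - 1, by unfold pvFuel; omega⟩
  simp only [bicycleYard, bicycleYard_alt, e0, e1, eT, hk]
  have htR : (0 : Int) < (terrain.length : Int) := by exact_mod_cast ht0
  have htC : (0 : Int) < ((terrain.headD []).length : Int) := by exact_mod_cast htc0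
  set g : PvCtx := ⟨(terrain.length : Int), ((terrain.headD []).length : Int), terrain,
    obstacle, position.getD 0 0, position.getD 1 0⟩ with hgdef
  have hR : 0 < g.R := htR
  have hC : 0 < g.C := htC
  set vg0 : List (List (PySem.Set Int)) :=
    List.replicate g.R.toNat (List.replicate g.C.toNat PySem.Set.empty) with hvg0
  set wr : Int := PySem.Int.mod g.sr g.R with hwr
  set wc : Int := PySem.Int.mod g.sc g.C with hwc
  have hwr0 : 0 ≤ wr := PySem.Int.mod_nonneg _ hR
  have hwr1 : wr < g.R := PySem.Int.mod_lt _ hR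
  have hwc0 : 0 ≤ wc := PySem.Int.mod_nonneg _ hC
  have hwc1 : wc < g.C := PySem.Int.mod_lt _ hC
  have hshape0 : pvShape g.R g.C vg0 := by
    constructor
    · simp [hvg0]
    · intro row hrow
      rw [List.eq_of_mem_replicate hrow]
      simp
  have hcell0 : pvCell vg0 g.sr g.sc = PySem.Set.empty := by
    rw [pvCell_wrap g.R g.C hshape0 hsr0 hsr1 hsc0 hsc1 hR hC]
    exact pvCell_replicate g.R g.C hwr0 hwr1 hwc0 hwc1
  have hvis0 : ¬ PySem.Set.contains (pvCell vg0 g.sr g.sc) 1 = true := by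
    rw [hcell0, PySem.Set.contains_iff]
    simp [PySem.Set.empty]
  set vg1 : List (List (PySem.Set Int)) :=
    pvSetCell vg0 g.sr g.sc (PySem.Set.add (pvCell vg0 g.sr g.sc) 1) with hvg1
  have hvg1' : vg1 = pvSetCell vg0 wr wc (PySem.Set.add PySem.Set.empty 1) := by
    rw [hvg1, hcell0, pvSetCell_wrap g.R g.C hshape0 _ hsr0 hsr1 hsc0 hsc1 hR hC]
  have hshape1 : pvShape g.R g.C vg1 := by
    rw [hvg1']
    exact pvShape_pvSetCell g.R g.C hshape0 _ hwr0 hwr1 hwc0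
  have hkey0 : pvKey g (pvS0 g) = (wr, wc, 1) := rfl
  have hcell1 : ∀ r c : Int, 0 ≤ r → r < g.R → 0 ≤ c → c < g.C →
      pvCell vg1 r c = if r = wr ∧ c = wc then PySem.Set.add PySem.Set.empty 1
        else PySem.Set.empty := by
    intro r c h1 h2 h3 h4
    rw [hvg1', pvCell_pvSetCell g.R g.C hshape0 _ hwr0 hwr1 hwc0 hwc1 h1 h2 h3 h4]
    split_ifs with hif
    · rfl
    · exact pvCell_replicate g.R g.C h1 h2 h3 h4
  have hInv0 : pvInv g (fun a => a = pvS0 g) vg1 PySem.Set.empty := by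
    refine ⟨hshape1, rfl, ?_, ?_, List.nodup_nil, ?_⟩
    · rintro x rfl
      exact pvPR.init
    · intro r c s h1 h2 h3 h4
      rw [hcell1 r c h1 h2 h3 h4]
      constructor
      · intro hcont
        rw [PySem.Set.contains_iff] at hcont
        split_ifs at hcont with hif
        · rcases (PySem.Set.mem_add _ _ _).1 hcont with hmem | hs1
          · simp [PySem.Set.empty] at hmem
          · exact ⟨pvS0 g, rfl, by rw [hkey0, hif.1, hif.2, hs1]⟩
        · simp [PySem.Set.empty] at hcont
      · rintro ⟨x, rfl, hxk⟩
        rw [hkey0] at hxk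
        simp only [Prod.mk.injEq] at hxk
        obtain ⟨h5, h6, h7⟩ := hxk
        rw [if_pos ⟨h5.symm, h6.symm⟩, PySem.Set.contains_iff]
        exact (PySem.Set.mem_add _ _ _).2 (Or.inr h7.symm)
    · intro p
      constructor
      · intro hp
        exact absurd hp (by simp [PySem.Set.empty])
      · rintro ⟨hp1, hp2⟩
        exfalso
        apply hp2
        have h5 : (p.1, p.2, (1 : Int)) = (g.sr, g.sc, (1 : Int)) := hp1
        simp only [Prod.mk.injEq] at h5
        exact Prod.ext h5.1 h5.2.1
  -- one unfolding step of each port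
  have hstepA : pvLoopA g.R g.C g.t g.o (g.sr, g.sc) (k + 1) [(g.sr, g.sc, 1)] vg0
      PySem.Set.empty =
      pvLoopA g.R g.C g.t g.o (g.sr, g.sc) k (pvNbrs g.R g.C g.t g.o g.sr g.sc 1) vg1
        PySem.Set.empty := by
    simp only [pvLoopA]
    rw [if_neg hvis0, if_neg (by simp), List.nil_append]
  have hstepB : pvDfs g.R g.C g.t g.o (g.sr, g.sc) (k + 1) (g.sr, g.sc, 1)
      (vg0, PySem.Set.empty) =
      pvDfsL g.R g.C g.t g.o (g.sr, g.sc) k (pvNbrs g.R g.C g.t g.o g.sr g.sc 1)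
        (vg1, PySem.Set.empty) := by
    simp only [pvDfs]
    rw [if_neg hvis0, if_neg (by simp)]
  show PySem.List.sorted (pvLoopA g.R g.C g.t g.o (g.sr, g.sc) (k + 1) [(g.sr, g.sc, 1)]
      vg0 PySem.Set.empty) (fun p => toLex p) false =
    PySem.List.sorted (pvDfs g.R g.C g.t g.o (g.sr, g.sc) (k + 1) (g.sr, g.sc, 1)
      (vg0, PySem.Set.empty)).2 (fun p => toLex p) false
  rw [hstepA, hstepB]
  rcases hdisj with ⟨hrect, holen, horect, hob⟩ | ⟨hst1, hst2, hstuck⟩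
  · -- the problem's stated domain: both traversals compute the processed-state set
    have hg : pvCtxOK g := by
      refine ⟨htR, htC, rfl, ?_, holen, ?_, hob, hsr0, hsr1, hsc0, hsc1⟩
      · intro row hr
        rw [hrect row hr]
      · intro row hr
        rw [horect row hr]
    have hfb := pvFuel_big g hg
    have hUle := pvU_le_card g vg1
    have hnbl := pvNbrs_len g.R g.C g.t g.o g.sr g.sc 1
    have hfg : pvFuel g.t = k + 1 := hk
    -- A side
    have hA := pvMainA g hg k (pvNbrs g.R g.C g.t g.o g.sr g.sc 1) vg1 PySem.Set.empty
      (fun a => a = pvS0 g) hInv0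
      (fun y hy => ⟨pvS0 g, rfl, hy⟩)
      (by
        rintro z rfl y hy
        exact Or.inr hy)
      (by omega)
    -- B side
    obtain ⟨S2, hm2, hInv2, hdoneAll, hcl2⟩ := pvMainBL g hg k (pvMainB g hg k)
      (pvNbrs g.R g.C g.t g.o g.sr g.sc 1) vg1 PySem.Set.empty
      (fun a => a = pvS0 g) hInv0
      (fun y hy => ⟨pvS0 g, rfl, hy⟩)
      (by omega)
    have hdone : ∀ x, pvPR g x → pvDone g S2 x := by
      refine pvComplete g hg hInv2.2.2.1 hInv2.2.1 ?_
      intro z hz y hy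
      by_cases hz0 : z = pvS0 g
      · subst hz0
        exact hdoneAll y hy
      · exact hcl2 z hz hz0 y hy
    have hcharB := pvCharOfDone g hg hInv2.2.2.1 hInv2.2.2.2.2.2 hdone
    have hndB := hInv2.2.2.2.2.1

    have hperm : (pvLoopA g.R g.C g.t g.o (g.sr, g.sc) k
        (pvNbrs g.R g.C g.t g.o g.sr g.sc 1) vg1 PySem.Set.empty).Perm
        (pvDfsL g.R g.C g.t g.o (g.sr, g.sc) k (pvNbrs g.R g.C g.t g.o g.sr g.sc 1)
          (vg1, PySem.Set.empty)).2 := by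
      rw [List.perm_ext_iff_of_nodup hA.1 hndB]
      intro p
      rw [hA.2 p, hcharB p]
    exact PySem.List.sorted_eq_sorted_of_perm _ _ _ (fun a b h => toLex.injective h) hperm
  · -- stuck start: the first expansion refuses every move, both searches stop at once
    have hnil : pvNbrs g.R g.C g.t g.o g.sr g.sc 1 = [] := by
      refine pvNbrs_nil g.R g.C g.t g.o g.sr g.sc 1 ?_
      intro p hp h1 h2 h3 h4
      exact (hstuck p hp h1 h2 h3 h4).2.2.2
    rw [hnil]
    simp only [pvLoopA, pvDfsL]
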